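-- pv_equiv track=rewrite | github.com/pieps/YaDc | src/pss_room.py | _get_key_for_room_sort
-- ===== SOURCE A (Python) =====
-- ROOM_DESIGN_KEY_NAME = 'RoomDesignId'
--
-- def __get_parents(room_info: dict, rooms_designs_data: dict) -> list:
--     parent_room_design_id = room_info['UpgradeFromRoomDesignId']
--     if parent_room_design_id == '0':
--         parent_room_design_id = None
--
--     if parent_room_design_id is not None:
--         parent_info = rooms_designs_data[parent_room_design_id]
--         result = __get_parents(parent_info, rooms_designs_data)
--         result.append(parent_info)
--         return result
--     else:
--         return []
--
-- def _get_key_for_room_sort(room_info: dict, rooms_designs_data: dict) -> str: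
--     result = ''
--     parent_infos = __get_parents(room_info, rooms_designs_data)
--     if parent_infos:
--         for parent_info in parent_infos:
--             result += parent_info[ROOM_DESIGN_KEY_NAME].zfill(4)
--     result += room_info[ROOM_DESIGN_KEY_NAME].zfill(4)
--     return result
-- ===== SOURCE B (Python) =====
-- ROOM_DESIGN_KEY_NAME = 'RoomDesignId'
--
-- def _get_key_for_room_sort(room_info: dict, rooms_designs_data: dict) -> str:
--     keys = [room_info[ROOM_DESIGN_KEY_NAME].zfill(4)]
--     current = room_info
--     while True:
--         parent_id = current['UpgradeFromRoomDesignId']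
--         if parent_id == '0':
--             break
--         current = rooms_designs_data[parent_id]
--         keys.insert(0, current[ROOM_DESIGN_KEY_NAME].zfill(4))
--     return ''.join(keys)
-- ===== Notes on version B (the rewrite author's own statement) =====
-- stated objective: simpler
-- what changed: Drops the recursive __get_parents helper and its second pass over ancestor dicts: B walks the parent chain once, prepending each ancestor's zfilled id to an accumulator list (so the list is root-first by construction, no reverse and no recursion), and joins it at the end.
import Mathlib
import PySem

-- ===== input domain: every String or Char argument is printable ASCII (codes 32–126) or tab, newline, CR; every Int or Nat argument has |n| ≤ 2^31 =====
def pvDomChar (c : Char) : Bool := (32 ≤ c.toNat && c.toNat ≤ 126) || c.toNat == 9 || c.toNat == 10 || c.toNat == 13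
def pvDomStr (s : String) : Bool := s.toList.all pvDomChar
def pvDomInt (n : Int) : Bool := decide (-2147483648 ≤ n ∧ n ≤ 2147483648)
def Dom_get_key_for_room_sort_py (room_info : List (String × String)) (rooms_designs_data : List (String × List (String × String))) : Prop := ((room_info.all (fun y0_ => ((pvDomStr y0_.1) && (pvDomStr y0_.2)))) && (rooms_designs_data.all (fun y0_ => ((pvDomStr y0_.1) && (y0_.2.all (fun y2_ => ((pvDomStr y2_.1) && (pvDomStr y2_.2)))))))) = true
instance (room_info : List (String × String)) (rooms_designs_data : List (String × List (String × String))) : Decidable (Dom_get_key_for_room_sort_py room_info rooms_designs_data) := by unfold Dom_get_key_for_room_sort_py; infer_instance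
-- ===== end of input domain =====

-- B drops the recursive __get_parents helper and its second pass over ancestor dicts: one
-- iterative walk prepends each ancestor's zfilled id to an accumulator (root-first by
-- construction, no reverse, no recursion helper) and joins once at the end.

-- ===== PORT A =====
-- A reads dict entries: first-match lookup (Python dict rendered as association list)
def pvGet (d : List (String × String)) (k : String) : Option String := (PySem.Dict.mk d).get? k

-- room_info['UpgradeFromRoomDesignId']  (Python raises KeyError when absent: outside Pre_, "" default never reached there)
def pvParentId (room : List (String × String)) : String := (pvGet room "UpgradeFromRoomDesignId").getD ""

-- room_info[ROOM_DESIGN_KEY_NAME].zfill(4)  (same caveat on the missing-key default)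
def pvRoomKey (room : List (String × String)) : String := PySem.Str.zfill ((pvGet room "RoomDesignId").getD "") 4

-- __get_parents: recursion bounded by fuel; under Pre_ the chain strictly descends, so fuel
-- (length+1) is never exhausted; the `none` lookup branch is Python's KeyError, outside Pre_.
def pvGetParents (fuel : Nat) (room_info : List (String × String)) (rooms_designs_data : List (String × List (String × String))) : List (List (String × String)) :=
  match fuel with
  | 0 => []
  | fuel + 1 =>
    let parent_room_design_id := pvParentId room_info
    if parent_room_design_id = "0" then []
    else
      match (PySem.Dict.mk rooms_designs_data).get? parent_room_design_id with
      | none => []   -- KeyError in Python: excluded by Pre_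
      | some parent_info => pvGetParents fuel parent_info rooms_designs_data ++ [parent_info]

def get_key_for_room_sort_py (room_info : List (String × String)) (rooms_designs_data : List (String × List (String × String))) : String :=
  let result := ""
  let parent_infos := pvGetParents (rooms_designs_data.length + 1) room_info rooms_designs_data
  let result := if parent_infos.isEmpty then result
                else parent_infos.foldl (fun acc parent_info => acc ++ pvRoomKey parent_info) result
  result ++ pvRoomKey room_info

-- ===== PORT B =====
-- Source B's dict reads, first-match lookup via List.lookup (same semantics as a Python dict here)
def altKey (room : List (String × String)) : String :=
  PySem.Str.zfill ((List.lookup "RoomDesignId" room).getD "") 4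

-- Source B's while loop as an accumulator-passing walk: each ancestor's key is prepended, so `keys`
-- ends up root-first; fuel bounds the walk (never exhausted under Pre_); the `none` branch is
-- Python's KeyError, outside Pre_.
def pvWalk (fuel : Nat) (current : List (String × String)) (rooms_designs_data : List (String × List (String × String))) (keys : List String) : List String :=
  match fuel with
  | 0 => keys
  | fuel + 1 =>
    let parent_id := (List.lookup "UpgradeFromRoomDesignId" current).getD ""
    if parent_id = "0" then keys
    else
      match List.lookup parent_id rooms_designs_data with
      | none => keys   -- KeyError in Python: excluded by Pre_
      | some parent_info => pvWalk fuel parent_info rooms_designs_data (altKey parent_info :: keys)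

def get_key_for_room_sort_py_alt (room_info : List (String × String)) (rooms_designs_data : List (String × List (String × String))) : String :=
  PySem.Str.join "" (pvWalk (rooms_designs_data.length + 1) room_info rooms_designs_data [altKey room_info])

-- ===== PRECONDITION & SPEC =====
-- a dict carries both keys A reads
def pvHasKeys (d : List (String × String)) : Bool :=
  (pvGet d "UpgradeFromRoomDesignId").isSome && (pvGet d "RoomDesignId").isSome

-- Well-formedness of the upgrade chain starting at parent id `pid`: every id on it (until the
-- sentinel '0') names a design that exists and carries both keys, and '0' is reached within
-- `bound` steps.  With bound = number of designs this is exactly acyclicity + resolvability.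
def pvChainOk (bound : Nat) (pid : String) (rooms_designs_data : List (String × List (String × String))) : Bool :=
  match bound with
  | 0 => pid == "0"
  | bound + 1 =>
    pid == "0" ||
      (match (PySem.Dict.mk rooms_designs_data).get? pid with
       | none => false
       | some info => pvHasKeys info && pvChainOk bound (pvParentId info) rooms_designs_data)

-- Pre_ = the natural domain: room_info carries both keys and its upgrade chain is resolvable and
-- acyclic — exactly the inputs on which the Python A returns (elsewhere it raises KeyError or
-- RecursionError).
def Pre_get_key_for_room_sort_py (room_info : List (String × String)) (rooms_designs_data : List (String × List (String × String))) : Prop :=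
  pvHasKeys room_info = true ∧
  pvChainOk rooms_designs_data.length (pvParentId room_info) rooms_designs_data = true

instance (room_info : List (String × String)) (rooms_designs_data : List (String × List (String × String))) : Decidable (Pre_get_key_for_room_sort_py room_info rooms_designs_data) := by unfold Pre_get_key_for_room_sort_py; infer_instance

def pvWitness_get_key_for_room_sort_py : (List (String × String)) × (List (String × List (String × String))) :=
  ([("UpgradeFromRoomDesignId", "2"), ("RoomDesignId", "1")],
   [("3", [("UpgradeFromRoomDesignId", "0"), ("RoomDesignId", "3")]),
    ("2", [("UpgradeFromRoomDesignId", "3"), ("RoomDesignId", "2")])])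

def Spec_get_key_for_room_sort_py (room_info : List (String × String)) (rooms_designs_data : List (String × List (String × String))) (out : String) : Prop := out = get_key_for_room_sort_py_alt room_info rooms_designs_data
instance (room_info : List (String × String)) (rooms_designs_data : List (String × List (String × String))) (out : String) : Decidable (Spec_get_key_for_room_sort_py room_info rooms_designs_data out) := by unfold Spec_get_key_for_room_sort_py; infer_instance

-- ===== CLAIM =====
def Claim_equal_get_key_for_room_sort_py : Prop := ∀ (room_info : List (String × String)) (rooms_designs_data : List (String × List (String × String))), Dom_get_key_for_room_sort_py room_info rooms_designs_data → Pre_get_key_for_room_sort_py room_info rooms_designs_data → Spec_get_key_for_room_sort_py room_info rooms_designs_data (get_key_for_room_sort_py room_info rooms_designs_data)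

-- ===== LEMMAS AND PROOFS =====

-- first-match: List.lookup agrees with the Dict view of the same association list
lemma pv_lookup_eq_get (d : List (String × String)) (k : String) :
    List.lookup k d = (PySem.Dict.mk d).get? k := by
  induction d with
  | nil => simp [List.lookup, PySem.Dict.get?]
  | cons p rest ih =>
    obtain ⟨a, b⟩ := p
    by_cases h : k = a
    · simp [List.lookup, PySem.Dict.get?_mk_cons, h]
    · have hb : (k == a) = false := beq_eq_false_iff_ne.mpr h
      simp [List.lookup, PySem.Dict.get?_mk_cons, hb, Ne.symm h, ih]

lemma pv_lookup2_eq_get (d : List (String × List (String × String))) (k : String) :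
    List.lookup k d = (PySem.Dict.mk d).get? k := by
  induction d with
  | nil => simp [List.lookup, PySem.Dict.get?]
  | cons p rest ih =>
    obtain ⟨a, b⟩ := p
    by_cases h : k = a
    · simp [List.lookup, PySem.Dict.get?_mk_cons, h]
    · have hb : (k == a) = false := beq_eq_false_iff_ne.mpr h
      simp [List.lookup, PySem.Dict.get?_mk_cons, hb, Ne.symm h, ih]

lemma pv_altKey_eq (room : List (String × String)) : altKey room = pvRoomKey room := by
  simp [altKey, pvRoomKey, pvGet, pv_lookup_eq_get]

lemma pv_join_empty_cons (x : String) (xs : List String) :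
    PySem.Str.join "" (x :: xs) = x ++ PySem.Str.join "" xs := by
  cases xs with
  | nil => simp [PySem.Str.join, PySem.Chars.join_singleton]
  | cons y ys => simp [PySem.Str.join, PySem.Chars.join_cons_cons, String.ofList_append]

-- A's `result +=` loop over a list, started from any accumulator, is that accumulator
-- followed by the ''-join of the keys.
lemma pv_foldl_eq_join (l : List (List (String × String))) (init : String) :
    l.foldl (fun acc parent_info => acc ++ pvRoomKey parent_info) init
      = init ++ PySem.Str.join "" (l.map pvRoomKey) := by
  induction l generalizing init with
  | nil => simp [PySem.Str.join, PySem.Chars.join_nil]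
  | cons p rest ih => simp [List.foldl_cons, ih, pv_join_empty_cons, String.append_assoc]

lemma pv_join_nil : PySem.Str.join "" ([] : List String) = "" := by
  simp [PySem.Str.join, PySem.Chars.join_nil]

-- ''-join distributes over a final singleton.
lemma pv_join_append_singleton (ks : List String) (k : String) :
    PySem.Str.join "" (ks ++ [k]) = PySem.Str.join "" ks ++ k := by
  induction ks with
  | nil => simp [pv_join_empty_cons, pv_join_nil]
  | cons x xs ih => simp [pv_join_empty_cons, ih, String.append_assoc]

-- B's accumulator walk prepends exactly the keys of A's root-first ancestor list.
lemma pv_walk_eq_parents (fuel : Nat) (room : List (String × String)) (rooms : List (String × List (String × String))) (acc : List String) :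
    pvWalk fuel room rooms acc
      = ((pvGetParents fuel room rooms).map pvRoomKey) ++ acc := by
  induction fuel generalizing room acc with
  | zero => simp [pvWalk, pvGetParents]
  | succ fuel ih =>
    by_cases h0 : pvParentId room = "0"
    · simp [pvWalk, pvGetParents, pv_lookup_eq_get, pvParentId, pvGet] at h0 ⊢
      simp [h0]
    · cases hl : (PySem.Dict.mk rooms).get? (pvParentId room) with
      | none =>
        rw [pvWalk, pvGetParents]
        simp only [pv_lookup_eq_get, pv_lookup2_eq_get]
        simp only [pvParentId, pvGet] at h0 hl
        simp [pvParentId, pvGet, h0, hl]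
      | some parent_info =>
        rw [pvWalk, pvGetParents]
        simp only [pv_lookup_eq_get, pv_lookup2_eq_get]
        simp only [pvParentId, pvGet] at h0 hl
        simp [pvParentId, pvGet, h0, hl, ih, pv_altKey_eq]

-- ===== VERDICT =====
theorem get_key_for_room_sort_py_spec : Claim_equal_get_key_for_room_sort_py := by
  intro room_info rooms_designs_data _ _
  unfold Spec_get_key_for_room_sort_py
  simp only [get_key_for_room_sort_py, get_key_for_room_sort_py_alt, pv_walk_eq_parents,
    pv_altKey_eq, pv_foldl_eq_join, pv_join_append_singleton]
  by_cases he : (pvGetParents (rooms_designs_data.length + 1) room_info rooms_designs_data).isEmpty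
  · rw [List.isEmpty_iff] at he
    simp [he, pv_join_nil]
  · simp [he, String.empty_append]
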